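-- pv_equiv track=rewrite | github.com/OverIQ429/AlgoSirius | 2homework.py | form_relev_values
-- ===== SOURCE A (Python) =====
-- def math_relev(n_value, a_values, d_strings):
--     relevant = []
--     for symbol in d_strings:
--         relevant_value = 0
--         for i in range(n_value):
--             relevant_value += a_values[i] * symbol[i]
--         relevant.append((symbol, relevant_value))
--     relevant.sort(key=lambda x: x[1], reverse=True)
--     return relevant
--
-- def form_relev_values(n_value, a_values, d_strings, q_array):
--     anser = []
--     for element in q_array:
--         if element[0] == 1:
--             relevant = math_relev(n_value, a_values, d_strings)
--             relevant.sort(key = lambda x: x[1], reverse=True)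
--             max_value = [x[0] for x in relevant[:element[1]]]
--             anser.append(max_value)
--         if element[0] == 2:
--             for key,value in enumerate(d_strings):
--                 if key == element[1]:
--                     for i,step in enumerate(value):
--                         if step == element[2]:
--                             value[i] = element[3]
--     return anser
-- ===== SOURCE B (Python) =====
-- def form_relev_values(n_value, a_values, d_strings, q_array):
--     rel = None          # dot products, computed at the first type-1 query, then updated incrementally
--     picks = []          # per type-1 query: the indices of the chosen rows
--     for q in q_array:
--         if q[0] == 1:
--             if rel is None:
--                 rel = [sum(a_values[i] * row[i] for i in range(n_value)) for row in d_strings]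
--             order = sorted(enumerate(rel), key=lambda p: p[1], reverse=True)
--             picks.append([j for j, _ in order[:q[1]]])
--         elif q[0] == 2:
--             j = q[1]
--             if 0 <= j < len(d_strings):
--                 row = d_strings[j]
--                 old = q[2]
--                 if old in row:      # nothing to replace otherwise
--                     new = q[3]
--                     if rel is not None:
--                         rel[j] += (new - old) * sum(a_values[i] for i in range(n_value) if row[i] == old)
--                     for i, v in enumerate(row):
--                         if v == old:
--                             row[i] = new
--     return [[d_strings[j] for j in js] for js in picks]
-- ===== Notes on version B (the rewrite author's own statement) =====
-- stated objective: alternative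
-- what changed: B computes the D dot products once (lazily, at the first type-1 query) and updates the affected product incrementally on each type-2 update that actually replaces something, sorting only (index, relevance) pairs per type-1 query, instead of A's recomputation of every dot product plus a double sort on every type-1 query; answer rows are indices resolved against the final (mutated) d_strings, reproducing A's aliasing of answer rows.
-- outside the precondition, e.g. on form_relev_values(1, [1], [], [[2]]): A returns [], B raises IndexError; on form_relev_values(1, [1], [[]], [[2, 0]]): A returns [], B raises IndexError; on form_relev_values(1, [1], [[5], [7]], [[2, 0, 7]]): A returns [], B returns []
import Mathlib
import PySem

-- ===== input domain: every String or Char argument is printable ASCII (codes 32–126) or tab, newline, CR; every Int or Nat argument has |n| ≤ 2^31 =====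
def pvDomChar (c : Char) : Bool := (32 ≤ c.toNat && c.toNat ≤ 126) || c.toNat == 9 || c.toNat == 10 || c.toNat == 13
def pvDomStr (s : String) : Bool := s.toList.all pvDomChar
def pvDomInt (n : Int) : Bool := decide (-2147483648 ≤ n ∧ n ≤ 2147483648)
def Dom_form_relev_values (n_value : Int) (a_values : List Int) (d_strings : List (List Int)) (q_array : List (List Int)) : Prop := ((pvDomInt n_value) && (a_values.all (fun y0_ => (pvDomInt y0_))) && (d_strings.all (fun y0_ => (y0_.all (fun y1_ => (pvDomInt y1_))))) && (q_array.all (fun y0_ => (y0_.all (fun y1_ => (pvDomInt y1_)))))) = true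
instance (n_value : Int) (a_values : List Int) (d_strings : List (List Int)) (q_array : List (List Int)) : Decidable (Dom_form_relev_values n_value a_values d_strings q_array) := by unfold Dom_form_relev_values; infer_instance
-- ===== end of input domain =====

-- B replaces A's per-query recomputation of every dot product by dot products computed
-- once and updated incrementally on effective type-2 updates (objective: alternative;
-- both programs mutate d_strings in place in Python, and the returned answer rows alias
-- the mutated rows — both ports model that aliasing by indices resolved against the
-- final row contents).

-- ===== PORT A =====
-- the inner loop 'for i in range(n_value): relevant_value += a_values[i] * symbol[i]'
def pvDot (n_value : Int) (a_values row : List Int) : Int :=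
  (PySem.List.pyRange 0 n_value 1).foldl
    (fun relevant_value i =>
      relevant_value + PySem.List.pyGetD a_values i 0 * PySem.List.pyGetD row i 0) 0

-- math_relev; each appended 'symbol' is a live reference to a row of d_strings,
-- modeled by the row's index (the Int of enumerate), materialised at return
def math_relev (n_value : Int) (a_values : List Int) (d_strings : List (List Int)) :
    List (Int × Int) :=
  let relevant := (PySem.List.enumerate d_strings).foldl
    (fun acc p => acc ++ [(p.1, pvDot n_value a_values p.2)]) []
  PySem.List.sorted relevant (fun x => x.2) true

-- one query of A's loop; state = (d_strings, anser-as-index-lists)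
def pvStepA (n_value : Int) (a_values : List Int)
    (st : List (List Int) × List (List Int)) (element : List Int) :
    List (List Int) × List (List Int) :=
  let st1 :=
    if PySem.List.pyGetD element 0 0 == 1 then
      let relevant := math_relev n_value a_values st.1
      let relevant := PySem.List.sorted relevant (fun x => x.2) true
      let max_value :=
        (PySem.List.slice relevant none (some (PySem.List.pyGetD element 1 0))).map (fun x => x.1)
      (st.1, st.2 ++ [max_value])
    else st
  if PySem.List.pyGetD element 0 0 == 2 then
    -- in-place writes value[i] = element[3] at the matching positions, as a rebuilt row
    ((PySem.List.enumerate st1.1).map (fun kv =>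
        if kv.1 == PySem.List.pyGetD element 1 0 then
          kv.2.map (fun step =>
            if step == PySem.List.pyGetD element 2 0 then PySem.List.pyGetD element 3 0 else step)
        else kv.2),
      st1.2)
  else st1

def form_relev_values (n_value : Int) (a_values : List Int) (d_strings : List (List Int)) (q_array : List (List Int)) : List (List (List Int)) :=
  let st := q_array.foldl (pvStepA n_value a_values) (d_strings, [])
  st.2.map (fun js => js.map (fun j => PySem.List.pyGetD st.1 j []))

-- ===== PORT B =====
-- sum(a_values[i] for i in range(n_value) if row[i] == old)
def pvDeltaSum (n_value : Int) (a_values row : List Int) (old : Int) : Int :=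
  (((PySem.List.pyRange 0 n_value 1).filter
      (fun i => PySem.List.pyGetD row i 0 == old)).map
    (fun i => PySem.List.pyGetD a_values i 0)).sum

-- one query of B's loop; state = (d_strings, lazy relevance cache, picks)
def pvStepB (n_value : Int) (a_values : List Int)
    (st : List (List Int) × Option (List Int) × List (List Int)) (q : List Int) :
    List (List Int) × Option (List Int) × List (List Int) :=
  if PySem.List.pyGetD q 0 0 == 1 then
    let rel := match st.2.1 with
      | some r => r
      | none => st.1.map (fun row => pvDot n_value a_values row)
    let order := PySem.List.sorted (PySem.List.enumerate rel) (fun p => p.2) true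
    (st.1, some rel,
      st.2.2 ++ [(PySem.List.slice order none (some (PySem.List.pyGetD q 1 0))).map (fun p => p.1)])
  else if PySem.List.pyGetD q 0 0 == 2 then
    let j := PySem.List.pyGetD q 1 0
    if 0 ≤ j ∧ j < (st.1.length : Int) then
      let row := PySem.List.pyGetD st.1 j []
      let old := PySem.List.pyGetD q 2 0
      if old ∈ row then  -- nothing to replace otherwise
        let nw := PySem.List.pyGetD q 3 0
        (PySem.List.pySetD st.1 j (row.map (fun v => if v == old then nw else v)),
          st.2.1.map (fun r =>
            PySem.List.pySetD r j
              (PySem.List.pyGetD r j 0 + (nw - old) * pvDeltaSum n_value a_values row old)),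
          st.2.2)
      else st
    else st
  else st

def form_relev_values_alt (n_value : Int) (a_values : List Int) (d_strings : List (List Int)) (q_array : List (List Int)) : List (List (List Int)) :=
  let st := q_array.foldl (pvStepB n_value a_values) (d_strings, none, [])
  st.2.2.map (fun js => js.map (fun j => PySem.List.pyGetD st.1 j []))

-- ===== PRECONDITION & SPEC =====
-- Pre_ excludes inputs where one of the Pythons raises IndexError: queries too short for
-- the fields that get read (B reads the row index, and for an in-range update the old
-- value, up front even on empty inputs, where A happens not to), queries whose in-range
-- update must read a 4th field (a 3-field update is kept only when its old value is
-- conservatively guaranteed absent from every row — not an initial value and not written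
-- by any update — since whether the 4th field is read depends on the mutated state), and
-- dot products indexing past a_values or a row.
def Pre_form_relev_values (n_value : Int) (a_values : List Int) (d_strings : List (List Int)) (q_array : List (List Int)) : Prop :=
  (∀ e ∈ q_array, e ≠ [] ∧
      (PySem.List.pyGetD e 0 0 = 1 → 2 ≤ e.length) ∧
      (PySem.List.pyGetD e 0 0 = 2 →
        2 ≤ e.length ∧
        (0 ≤ PySem.List.pyGetD e 1 0 ∧ PySem.List.pyGetD e 1 0 < (d_strings.length : Int) →
          3 ≤ e.length ∧
          (e.length < 4 →
            PySem.List.pyGetD e 2 0 ∉ d_strings.flatten ∧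
            ∀ e' ∈ q_array, ¬(PySem.List.pyGetD e' 0 0 = 2 ∧ 4 ≤ e'.length ∧
                PySem.List.pyGetD e' 3 0 = PySem.List.pyGetD e 2 0))))) ∧
  ((∃ e ∈ q_array, PySem.List.pyGetD e 0 0 = 1) →
    (d_strings = [] ∨ n_value ≤ (a_values.length : Int)) ∧
    ∀ row ∈ d_strings, n_value ≤ (row.length : Int))
instance (n_value : Int) (a_values : List Int) (d_strings : List (List Int)) (q_array : List (List Int)) : Decidable (Pre_form_relev_values n_value a_values d_strings q_array) := by unfold Pre_form_relev_values; infer_instance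

def pvWitness_form_relev_values : Int × List Int × List (List Int) × List (List Int) :=
  (2, [1, 2], [[3, 4], [5, 6]], [[1, 1], [2, 0, 3, 7], [1, 2]])

def Spec_form_relev_values (n_value : Int) (a_values : List Int) (d_strings : List (List Int)) (q_array : List (List Int)) (out : List (List (List Int))) : Prop := out = form_relev_values_alt n_value a_values d_strings q_array
instance (n_value : Int) (a_values : List Int) (d_strings : List (List Int)) (q_array : List (List Int)) (out : List (List (List Int))) : Decidable (Spec_form_relev_values n_value a_values d_strings q_array out) := by unfold Spec_form_relev_values; infer_instance

-- ===== CLAIM (what is proved, stated in full; the proofs are below) =====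
def Claim_equal_form_relev_values : Prop := ∀ (n_value : Int) (a_values : List Int) (d_strings : List (List Int)) (q_array : List (List Int)), Dom_form_relev_values n_value a_values d_strings q_array → Pre_form_relev_values n_value a_values d_strings q_array → Spec_form_relev_values n_value a_values d_strings q_array (form_relev_values n_value a_values d_strings q_array)

-- ===== LEMMAS AND PROOFS =====

-- enumerate of a mapped list
theorem pv_enumerate_map {α β : Type} (f : α → β) (xs : List α) (s : Int) :
    PySem.List.enumerate (xs.map f) s
      = (PySem.List.enumerate xs s).map (fun p => (p.1, f p.2)) := by
  induction xs generalizing s with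
  | nil => rfl
  | cons x xs ih => simp [PySem.List.enumerate_cons, ih]

-- A's type-2 scan when the index is in range: it rewrites exactly row e1
theorem pv_enumMap_set {α : Type} (D : List α) (e1 : Int) (g : α → α) (d : α)
    (h0 : 0 ≤ e1) (h1 : e1 < (D.length : Int)) :
    (PySem.List.enumerate D).map (fun kv => if kv.1 == e1 then g kv.2 else kv.2)
      = D.set e1.toNat (g (PySem.List.pyGetD D e1 d)) := by
  rw [PySem.List.pyGetD_eq_getElem D d h0 h1]
  apply List.ext_getElem
  · simp [PySem.List.length_enumerate]
  · intro k hk hk'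
    have hkd : k < D.length := by simpa using hk'
    have hke : k < (PySem.List.enumerate D 0).length := by
      simpa [PySem.List.length_enumerate] using hkd
    rw [List.getElem_map, PySem.List.getElem_enumerate D 0 k hke, List.getElem_set]
    by_cases hc : (k : Int) = e1
    · have : e1.toNat = k := by omega
      simp [this, hc]
    · have hb : ((0 + (k:Int) == e1) = false) := by simp; omega
      have h2 : ¬ e1.toNat = k := by omega
      simp [h2]
      intro hh; exact absurd hh hc

theorem pv_enumMap_id {α : Type} (D : List α) (e1 : Int) (g : α → α)
    (h : ¬(0 ≤ e1 ∧ e1 < (D.length : Int))) :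
    (PySem.List.enumerate D).map (fun kv => if kv.1 == e1 then g kv.2 else kv.2) = D := by
  have : ∀ kv ∈ PySem.List.enumerate D 0,
      (if kv.1 == e1 then g kv.2 else kv.2) = kv.2 := by
    intro kv hkv
    rcases (PySem.List.mem_enumerate_iff D 0 kv).1 hkv with ⟨k, hk, rfl⟩
    have hne : ¬ ((k:Int) = e1) := by omega
    simp
    intro hh; exact absurd hh hne
  rw [List.map_congr_left this, PySem.List.map_snd_enumerate]

-- replacing an absent value is the identity
theorem pv_map_replace_id (row : List Int) (old nw : Int) (h : old ∉ row) :
    row.map (fun v => if v == old then nw else v) = row := by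
  have : ∀ v ∈ row, (if v == old then nw else v) = v := by
    intro v hv
    have : ¬ (v = old) := fun he => h (he ▸ hv)
    simp [this]
  simpa using List.map_congr_left this

-- setting an index to its own value is the identity
theorem pv_set_self {α : Type} (D : List α) (k : Nat) (x : α)
    (hk : k < D.length) (hx : x = D[k]) : D.set k x = D := by
  apply List.ext_getElem
  · simp
  · intro i hi hi'
    rw [List.getElem_set]
    by_cases h : k = i
    · subst h; simpa using hx
    · simp [h]

-- pointwise form of the incremental dot-product update
theorem pv_sum_replace (a_values row : List Int) (old nw : Int) (L : List Int)
    (hL : ∀ i ∈ L, 0 ≤ i ∧ i < (row.length : Int)) :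
    (L.map (fun i => PySem.List.pyGetD a_values i 0 *
        PySem.List.pyGetD (row.map (fun v => if v == old then nw else v)) i 0)).sum
      = (L.map (fun i => PySem.List.pyGetD a_values i 0 * PySem.List.pyGetD row i 0)).sum
        + (nw - old) * ((L.filter (fun i => PySem.List.pyGetD row i 0 == old)).map
            (fun i => PySem.List.pyGetD a_values i 0)).sum := by
  induction L with
  | nil => simp
  | cons i L ih =>
    have hi := hL i (by simp)
    have ih' := ih (fun j hj => hL j (by simp [hj]))
    have hlen : i < ((row.map (fun v => if v == old then nw else v)).length : Int) := by
      simpa using hi.2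
    have hrep : PySem.List.pyGetD (row.map (fun v => if v == old then nw else v)) i 0
        = (if PySem.List.pyGetD row i 0 == old then nw else PySem.List.pyGetD row i 0) := by
      rw [PySem.List.pyGetD_eq_getElem _ 0 hi.1 hlen,
          PySem.List.pyGetD_eq_getElem row 0 hi.1 hi.2, List.getElem_map]
    by_cases hc : PySem.List.pyGetD row i 0 == old
    · have hc' : PySem.List.pyGetD row i 0 = old := by simpa using hc
      simp only [List.map_cons, List.sum_cons, List.filter_cons, hrep, ih', hc', beq_self_eq_true, if_true]
      ring
    · simp only [List.map_cons, List.sum_cons, List.filter_cons, hc, hrep, ih']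
      simp only [Bool.false_eq_true, if_false]
      ring

theorem pv_dot_replace (n_value : Int) (a_values row : List Int) (old nw : Int)
    (h : n_value ≤ (row.length : Int)) :
    pvDot n_value a_values (row.map (fun v => if v == old then nw else v))
      = pvDot n_value a_values row + (nw - old) * pvDeltaSum n_value a_values row old := by
  unfold pvDot pvDeltaSum
  rw [PySem.List.foldl_add, PySem.List.foldl_add]
  simp only [zero_add]
  exact pv_sum_replace a_values row old nw _
    (fun i hi => by
      have := (PySem.List.mem_pyRange_one (a:=0) (b:=n_value) (x:=i)).1 hi
      exact ⟨this.1, lt_of_lt_of_le this.2 h⟩)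

-- a type-1 query extracts the same list from both states
theorem pv_query_eq (n_value : Int) (a_values : List Int) (D : List (List Int)) (k : Int) :
    (PySem.List.slice (PySem.List.sorted (math_relev n_value a_values D) (fun x => x.2) true)
        none (some k)).map (fun x => x.1)
      = (PySem.List.slice (PySem.List.sorted
            (PySem.List.enumerate (D.map (fun row => pvDot n_value a_values row)))
            (fun p => p.2) true) none (some k)).map (fun p => p.1) := by
  unfold math_relev
  rw [PySem.List.foldl_append_singleton_eq_map, PySem.List.sorted_rev_sorted_rev,
      pv_enumerate_map]
  simp

theorem pv_step (n_value : Int) (a_values : List Int) (e : List Int)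
    (D : List (List Int)) (ans : List (List Int)) (rel : Option (List Int))
    (h1 : PySem.List.pyGetD e 0 0 = 1 → ∀ row ∈ D, n_value ≤ (row.length : Int))
    (hrel : rel = none ∨ rel = some (D.map (fun row => pvDot n_value a_values row)) ∧
              ∀ row ∈ D, n_value ≤ (row.length : Int)) :
    pvStepA n_value a_values (D, ans) e
        = ((pvStepB n_value a_values (D, rel, ans) e).1,
           (pvStepB n_value a_values (D, rel, ans) e).2.2)
    ∧ ((pvStepB n_value a_values (D, rel, ans) e).2.1 = none ∨
        (pvStepB n_value a_values (D, rel, ans) e).2.1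
            = some ((pvStepB n_value a_values (D, rel, ans) e).1.map
                (fun row => pvDot n_value a_values row)) ∧
        ∀ row ∈ (pvStepB n_value a_values (D, rel, ans) e).1, n_value ≤ (row.length : Int))
    ∧ ((∀ row ∈ D, n_value ≤ (row.length : Int)) →
        ∀ row ∈ (pvStepB n_value a_values (D, rel, ans) e).1, n_value ≤ (row.length : Int)) := by
  by_cases hq1 : PySem.List.pyGetD e 0 0 = 1
  · -- type-1 query
    have hb1 : (PySem.List.pyGetD e 0 0 == 1) = true := by simp [hq1]
    have hb2 : (PySem.List.pyGetD e 0 0 == 2) = false := by simp [hq1]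
    have hbound := h1 hq1
    rcases hrel with hrel | ⟨hrel, _⟩ <;>
      subst hrel <;>
      simp only [pvStepA, pvStepB, hb1, hb2, if_true, Bool.false_eq_true, if_false]
    · exact ⟨by rw [pv_query_eq], Or.inr ⟨trivial, hbound⟩, fun hb => hb⟩
    · exact ⟨by rw [pv_query_eq], Or.inr ⟨trivial, hbound⟩, fun hb => hb⟩
  · have hb1 : (PySem.List.pyGetD e 0 0 == 1) = false := by simp [hq1]
    by_cases hq2 : PySem.List.pyGetD e 0 0 = 2
    · have hb2 : (PySem.List.pyGetD e 0 0 == 2) = true := by simp [hq2]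
      by_cases hin : 0 ≤ PySem.List.pyGetD e 1 0 ∧
          PySem.List.pyGetD e 1 0 < (D.length : Int)
      · -- in-range update
        by_cases hmem : PySem.List.pyGetD e 2 0 ∈ PySem.List.pyGetD D (PySem.List.pyGetD e 1 0) []
        · -- the old value occurs: both rewrite the row; B also patches its cache
          simp only [pvStepA, pvStepB, hb1, hb2, Bool.false_eq_true, if_false, if_true,
            if_pos hin, if_pos hmem]
          have hset := pv_enumMap_set D (PySem.List.pyGetD e 1 0)
            (fun r => r.map (fun step =>
              if step == PySem.List.pyGetD e 2 0 then PySem.List.pyGetD e 3 0 else step))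
            ([] : List Int) hin.1 hin.2
          have hD' : PySem.List.pySetD D (PySem.List.pyGetD e 1 0)
                ((PySem.List.pyGetD D (PySem.List.pyGetD e 1 0) []).map
                  (fun v => if v == PySem.List.pyGetD e 2 0 then PySem.List.pyGetD e 3 0 else v))
              = D.set (PySem.List.pyGetD e 1 0).toNat
                ((PySem.List.pyGetD D (PySem.List.pyGetD e 1 0) []).map
                  (fun v => if v == PySem.List.pyGetD e 2 0 then PySem.List.pyGetD e 3 0 else v)) :=
            PySem.List.pySetD_of_nonneg _ _ hin.1
          constructor
          · simp only [hset, hD']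
          constructor
          · -- rel invariant
            rcases hrel with hrel | ⟨hrel, hbound⟩
            · subst hrel; exact Or.inl rfl
            · subst hrel
              have hjn : (PySem.List.pyGetD e 1 0).toNat < D.length := by omega
              have hmemD : (PySem.List.pyGetD D (PySem.List.pyGetD e 1 0) []) ∈ D :=
                PySem.List.pyGetD_mem D [] ⟨by omega, hin.2⟩
              have hlen : n_value ≤
                  ((PySem.List.pyGetD D (PySem.List.pyGetD e 1 0) []).length : Int) :=
                hbound _ hmemD
              have hR : PySem.List.pyGetD
                    (D.map (fun row => pvDot n_value a_values row)) (PySem.List.pyGetD e 1 0) 0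
                  = pvDot n_value a_values (PySem.List.pyGetD D (PySem.List.pyGetD e 1 0) []) := by
                rw [PySem.List.pyGetD_eq_getElem _ 0 hin.1 (by simpa using hin.2),
                    PySem.List.pyGetD_eq_getElem D [] hin.1 hin.2, List.getElem_map]
              refine Or.inr ⟨?_, ?_⟩
              · simp only [Option.map_some, hD', List.map_set,
                  PySem.List.pySetD_of_nonneg _ _ hin.1, hR,
                  pv_dot_replace n_value a_values _ _ _ hlen]
              · intro row hrow
                rw [hD'] at hrow
                rcases List.mem_or_eq_of_mem_set hrow with hmem' | heq
                · exact hbound row hmem'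
                · subst heq
                  simpa using hlen
          · -- bounds preserved
            intro hb row hrow
            rw [hD'] at hrow
            rcases List.mem_or_eq_of_mem_set hrow with hmem' | heq
            · exact hb row hmem'
            · subst heq
              simp only [List.length_map]
              have : (PySem.List.pyGetD D (PySem.List.pyGetD e 1 0) []) ∈ D :=
                PySem.List.pyGetD_mem D [] ⟨by omega, hin.2⟩
              exact hb _ this
        · -- the old value is absent: B skips; A's rewrite is the identity
          simp only [pvStepA, pvStepB, hb1, hb2, Bool.false_eq_true, if_false, if_true,
            if_pos hin, if_neg hmem]
          have hset := pv_enumMap_set D (PySem.List.pyGetD e 1 0)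
            (fun r => r.map (fun step =>
              if step == PySem.List.pyGetD e 2 0 then PySem.List.pyGetD e 3 0 else step))
            ([] : List Int) hin.1 hin.2
          have hid := pv_map_replace_id (PySem.List.pyGetD D (PySem.List.pyGetD e 1 0) [])
            (PySem.List.pyGetD e 2 0) (PySem.List.pyGetD e 3 0) hmem
          have hjn : (PySem.List.pyGetD e 1 0).toNat < D.length := by omega
          have hDid : (PySem.List.enumerate D).map (fun kv =>
              if kv.1 == PySem.List.pyGetD e 1 0 then
                kv.2.map (fun step =>
                  if step == PySem.List.pyGetD e 2 0 then PySem.List.pyGetD e 3 0 else step)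
              else kv.2) = D := by
            rw [hset]
            simp only [hid]
            exact pv_set_self D _ _ hjn
              (by rw [PySem.List.pyGetD_eq_getElem D [] hin.1 hin.2])
          exact ⟨by rw [hDid], hrel, fun hb => hb⟩
      · simp only [pvStepA, pvStepB, hb1, hb2, Bool.false_eq_true, if_false, if_true,
          if_neg hin]
        refine ⟨?_, hrel, fun hb => hb⟩
        rw [pv_enumMap_id D _ _ hin]
    · have hb2 : (PySem.List.pyGetD e 0 0 == 2) = false := by simp [hq2]
      simp only [pvStepA, pvStepB, hb1, hb2, Bool.false_eq_true, if_false]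
      exact ⟨by first | rfl | trivial, hrel, fun hb => hb⟩

theorem pv_loop' (n_value : Int) (a_values : List Int) (qq : List (List Int)) :
    ∀ (qs : List (List Int)) (D : List (List Int)) (ans : List (List Int))
      (rel : Option (List Int)),
    (∀ e ∈ qs, e ∈ qq) →
    ((∃ e ∈ qq, PySem.List.pyGetD e 0 0 = 1) → ∀ row ∈ D, n_value ≤ (row.length : Int)) →
    (rel = none ∨ rel = some (D.map (fun row => pvDot n_value a_values row)) ∧
        ∀ row ∈ D, n_value ≤ (row.length : Int)) →
    qs.foldl (pvStepA n_value a_values) (D, ans)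
      = ((qs.foldl (pvStepB n_value a_values) (D, rel, ans)).1,
         (qs.foldl (pvStepB n_value a_values) (D, rel, ans)).2.2) := by
  intro qs
  induction qs with
  | nil => intro D ans rel _ _ _; rfl
  | cons e qs ih =>
    intro D ans rel hsub hE hrel
    have hstep := pv_step n_value a_values e D ans rel
      (fun hq => hE ⟨e, hsub e (by simp), hq⟩) hrel
    simp only [List.foldl_cons]
    rw [hstep.1]
    exact ih _ _ _ (fun x hx => hsub x (by simp [hx]))
      (fun h => hstep.2.2 (hE h)) hstep.2.1

-- ===== VERDICT (by name: the statement is the Claim_ definition above) =====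
theorem form_relev_values_spec : Claim_equal_form_relev_values := by
  intro n a d q _ hpre
  unfold Spec_form_relev_values form_relev_values form_relev_values_alt
  have := pv_loop' n a q q d [] none (fun e he => he)
    (fun h => (hpre.2 h).2) (Or.inl rfl)
  rw [this]
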